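-- pv_equiv track=rewrite | github.com/youngbin-ro/coding-test | python-algorithm-interview-book/chapter19. bitwise manipulation/utf-8-validation.py | validUtf8_1
-- ===== SOURCE A (Python) =====
-- from typing import List
--
-- def validUtf8_1(data: List[int]) -> bool:
--     if not data:
--         return True
--
--     def binarize(num):
--         num_bin = bin(num)[2:]
--         return '0' * (8 - len(num_bin)) + num_bin
--
--     str_bin = list(map(binarize, data))
--     if str_bin[0][0] == '0':
--         return validUtf8_1(data[1:])
--
--     elif str_bin[0][:3] == '110':
--         if len(data) < 2:
--             return False
--         if str_bin[1][:2] != '10':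
--             return False
--         return validUtf8_1(data[2:])
--
--     elif str_bin[0][:4] == '1110':
--         if len(data) < 3:
--             return False
--         for i in range(1, 3):
--             if str_bin[i][:2] != '10':
--                 return False
--         return validUtf8_1(data[3:])
--
--     elif str_bin[0][:5] == '11110':
--         if len(data) < 4:
--             return False
--         for i in range(1, 4):
--             if str_bin[i][:2] != '10':
--                 return False
--         return validUtf8_1(data[4:])
--
--     else:
--         return False
-- ===== SOURCE B (Python) =====
-- from typing import List
--
-- def validUtf8_1(data: List[int]) -> bool:
--     def binarize(num):
--         num_bin = bin(num)[2:]
--         return '0' * (8 - len(num_bin)) + num_bin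
--
--     need = 0  # continuation bytes still expected
--     for num in data:
--         s = binarize(num)
--         if need:
--             if s[:2] != '10':
--                 return False
--             need -= 1
--         elif s[0] == '0':
--             pass
--         elif s[:3] == '110':
--             need = 1
--         elif s[:4] == '1110':
--             need = 2
--         elif s[:5] == '11110':
--             need = 3
--         else:
--             return False
--     return need == 0
-- ===== Notes on version B (the rewrite author's own statement) =====
-- stated objective: faster
-- what changed: Replaces A's recursion that slices a fresh data[k:] copy and rebuilds the whole binarized list at every code point with a single iterative pass keeping a counter of expected continuation bytes.
import Mathlib
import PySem

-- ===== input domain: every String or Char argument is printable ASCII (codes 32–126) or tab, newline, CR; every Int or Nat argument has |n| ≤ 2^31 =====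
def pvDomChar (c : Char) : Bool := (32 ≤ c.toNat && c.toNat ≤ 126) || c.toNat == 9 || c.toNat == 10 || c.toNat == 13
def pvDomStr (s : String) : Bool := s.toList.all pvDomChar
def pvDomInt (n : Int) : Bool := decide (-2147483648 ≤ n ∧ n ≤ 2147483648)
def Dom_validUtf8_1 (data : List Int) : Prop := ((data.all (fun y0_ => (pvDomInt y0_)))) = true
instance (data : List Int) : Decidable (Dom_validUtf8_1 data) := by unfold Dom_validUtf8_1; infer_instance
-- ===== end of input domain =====

-- B replaces A's recursion-with-list-slicing (a fresh data[k:] copy and a fresh map per code point)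
-- by one iterative pass holding a counter of expected continuation bytes; objective: faster (linear, no slice copies).

-- ===== PORT A =====
-- shared helper: Python's `bin(num)[2:]` as a list of chars ('b'-prefixed for negatives, exactly as bin(-5)[2:] = 'b101')
def natBits (n : Nat) : List Char :=
  if h : n = 0 then []
  else natBits (n / 2) ++ [if n % 2 == 1 then '1' else '0']
termination_by n
decreasing_by exact Nat.div_lt_self (Nat.pos_of_ne_zero h) (by omega)

def binDigits (n : Nat) : List Char := if n = 0 then ['0'] else natBits n

-- Python's binarize: '0'-pad bin(num)[2:] on the left to (at least) 8 chars
def binarize (num : Int) : List Char :=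
  let numBin := if num < 0 then 'b' :: binDigits (-num).toNat else binDigits num.toNat
  List.replicate (8 - numBin.length) '0' ++ numBin

-- literal port of A: recursion consuming 1–4 leading elements, str_bin rebuilt per call;
-- str_bin[i] accesses are in range (guarded by the len checks), ported as getD.
def validUtf8_1 : List Int → Bool
  | [] => true
  | d0 :: rest =>
    let strBin := (d0 :: rest).map binarize
    let s0 := strBin.getD 0 []
    if s0.take 1 = ['0'] then validUtf8_1 rest
    else if s0.take 3 = ['1','1','0'] then
      if (d0 :: rest).length < 2 then false
      else if ¬ ((strBin.getD 1 []).take 2 = ['1','0']) then false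
      else validUtf8_1 (rest.drop 1)
    else if s0.take 4 = ['1','1','1','0'] then
      if (d0 :: rest).length < 3 then false
      else if ¬ ((strBin.getD 1 []).take 2 = ['1','0']) then false
      else if ¬ ((strBin.getD 2 []).take 2 = ['1','0']) then false
      else validUtf8_1 (rest.drop 2)
    else if s0.take 5 = ['1','1','1','1','0'] then
      if (d0 :: rest).length < 4 then false
      else if ¬ ((strBin.getD 1 []).take 2 = ['1','0']) then false
      else if ¬ ((strBin.getD 2 []).take 2 = ['1','0']) then false
      else if ¬ ((strBin.getD 3 []).take 2 = ['1','0']) then false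
      else validUtf8_1 (rest.drop 3)
    else false
termination_by data => data.length
decreasing_by all_goals (simp only [List.length_drop, List.length_cons]; omega)

-- ===== PORT B =====
-- B's loop with early return, as structural recursion over the list with the counter `need`
def altGo (need : Nat) : List Int → Bool
  | [] => need == 0
  | num :: rest =>
    let s := binarize num
    if need ≠ 0 then
      if ¬ (s.take 2 = ['1', '0']) then false else altGo (need - 1) rest
    else if s.take 1 = ['0'] then altGo 0 rest
    else if s.take 3 = ['1', '1', '0'] then altGo 1 rest
    else if s.take 4 = ['1', '1', '1', '0'] then altGo 2 rest
    else if s.take 5 = ['1', '1', '1', '1', '0'] then altGo 3 rest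
    else false

def validUtf8_1_alt (data : List Int) : Bool := altGo 0 data

-- ===== PRECONDITION & SPEC =====
def Spec_validUtf8_1 (data : List Int) (out : Bool) : Prop := out = validUtf8_1_alt data
instance (data : List Int) (out : Bool) : Decidable (Spec_validUtf8_1 data out) := by unfold Spec_validUtf8_1; infer_instance

-- ===== CLAIM (what is proved, stated in full; the proofs are below) =====
def Claim_equal_validUtf8_1 : Prop := ∀ (data : List Int), Dom_validUtf8_1 data → Spec_validUtf8_1 data (validUtf8_1 data)

-- ===== LEMMAS AND PROOFS =====

theorem key : ∀ (n : Nat) (data : List Int), data.length ≤ n → validUtf8_1 data = altGo 0 data := by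
  intro n
  induction n with
  | zero =>
    intro data h
    have : data = [] := List.eq_nil_of_length_eq_zero (Nat.le_zero.mp h)
    subst this
    simp [validUtf8_1, altGo]
  | succ n ih =>
    intro data h
    match data with
    | [] => simp [validUtf8_1, altGo]
    | d0 :: rest =>
      rw [validUtf8_1]
      simp only [List.map_cons, List.getD, List.getElem?_cons_zero, Option.getD_some]
      by_cases h0 : (binarize d0).take 1 = ['0']
      · have hr := ih rest (by simp at h; omega)
        simp [altGo, h0, hr]
      · by_cases h1 : (binarize d0).take 3 = ['1','1','0']
        · cases rest with
          | nil => simp [altGo, h0, h1]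
          | cons d1 r =>
            have hr := ih r (by simp at h; omega)
            by_cases hc : (binarize d1).take 2 = ['1','0'] <;>
              simp [altGo, h0, h1, hc, hr]
        · by_cases h2 : (binarize d0).take 4 = ['1','1','1','0']
          · match rest with
            | [] => simp [altGo, h0, h1, h2]
            | [d1] =>
              by_cases hc : (binarize d1).take 2 = ['1','0'] <;>
                simp [altGo, h0, h1, h2, hc]
            | d1 :: d2 :: r =>
              have hr := ih r (by simp at h; omega)
              by_cases hc1 : (binarize d1).take 2 = ['1','0'] <;>
                by_cases hc2 : (binarize d2).take 2 = ['1','0'] <;>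
                  simp [altGo, h0, h1, h2, hc1, hc2, hr]
          · by_cases h3 : (binarize d0).take 5 = ['1','1','1','1','0']
            · match rest with
              | [] => simp [altGo, h0, h1, h2, h3]
              | [d1] =>
                by_cases hc : (binarize d1).take 2 = ['1','0'] <;>
                  simp [altGo, h0, h1, h2, h3, hc]
              | [d1, d2] =>
                by_cases hc1 : (binarize d1).take 2 = ['1','0'] <;>
                  by_cases hc2 : (binarize d2).take 2 = ['1','0'] <;>
                    simp [altGo, h0, h1, h2, h3, hc1, hc2]
              | d1 :: d2 :: d3 :: r =>
                have hr := ih r (by simp at h; omega)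
                by_cases hc1 : (binarize d1).take 2 = ['1','0'] <;>
                  by_cases hc2 : (binarize d2).take 2 = ['1','0'] <;>
                    by_cases hc3 : (binarize d3).take 2 = ['1','0'] <;>
                      simp [altGo, h0, h1, h2, h3, hc1, hc2, hc3, hr]
            · simp [altGo, h0, h1, h2, h3]

-- ===== VERDICT (by name: the statement is the Claim_ definition above) =====
theorem validUtf8_1_spec : Claim_equal_validUtf8_1 := by
  intro data _
  unfold Spec_validUtf8_1 validUtf8_1_alt
  exact key data.length data le_rfl
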